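-- pv_equiv track=rewrite | github.com/tcowans/passion-xbmc | trunk/Scripts/Installeur-Passion/resources/libs/utilities.py | _replace_html_to_iso
-- ===== SOURCE A (Python) =====
-- def _replace_html_to_iso( strvalue ):
--     strvalue = strvalue.replace( "&#160;", '&nbsp;' )
--     # NO CONFORM
--     html_to_iso = {
--         '&#8211;': "-",
--         '&#8217;': "'",
--         '&euro;': "&#128;",
--         '&ldquo;': "&#147;",
--         '&rdquo;': "&#148;",
--         '&nbsp;': "&#32;", #'&nbsp;':   "&#160;",
--         '&hellip;': "&#133;", '&Hellip;': "&#133;",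
--         '&agrave;': "&#224;", '&Agrave;': "&#192;",
--         '&acirc;':  "&#226;", '&Acirc;':  "&#194;",
--         '&ccedil;': "&#231;", '&Ccedil;': "&#199;",
--         '&egrave;': "&#232;", '&Egrave;': "&#200;",
--         '&eacute;': "&#233;", '&Eacute;': "&#201;",
--         '&ecirc;':  "&#234;", '&Ecirc;':  "&#202;",
--         '&icirc;':  "&#238;", '&Icirc;':  "&#206;",
--         '&iuml;':   "&#239;", '&Iuml;':   "&#207;",
--         '&ocirc;':  "&#244;", '&Ocirc;':  "&#212;",
--         '&ugrave;': "&#249;", '&Ugrave;': "&#217;",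
--         '&ucirc;':  "&#251;", '&Ucirc;':  "&#219;"
--         }
--     for key, value in html_to_iso.items():
--         strvalue = strvalue.replace( key, value )
--     return strvalue
-- ===== SOURCE B (Python) =====
-- # One left-to-right scan; at each '&' the name between '&' and the closing ';'
-- # (within the maximal entity width) is resolved by a match-based resolver
-- # (A's '&#160;'->'&nbsp;'->'&#32;' chain folded in).
-- def _resolve(name):
--     match name:
--         case '#160' | 'nbsp':
--             return '&#32;'
--         case '#8211':
--             return '-'
--         case '#8217':
--             return "'"
--         case 'euro':
--             return '&#128;'
--         case 'ldquo':
--             return '&#147;'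
--         case 'rdquo':
--             return '&#148;'
--         case 'hellip' | 'Hellip':
--             return '&#133;'
--         case 'agrave':
--             return '&#224;'
--         case 'Agrave':
--             return '&#192;'
--         case 'acirc':
--             return '&#226;'
--         case 'Acirc':
--             return '&#194;'
--         case 'ccedil':
--             return '&#231;'
--         case 'Ccedil':
--             return '&#199;'
--         case 'egrave':
--             return '&#232;'
--         case 'Egrave':
--             return '&#200;'
--         case 'eacute':
--             return '&#233;'
--         case 'Eacute':
--             return '&#201;'
--         case 'ecirc':
--             return '&#234;'
--         case 'Ecirc':
--             return '&#202;'
--         case 'icirc':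
--             return '&#238;'
--         case 'Icirc':
--             return '&#206;'
--         case 'iuml':
--             return '&#239;'
--         case 'Iuml':
--             return '&#207;'
--         case 'ocirc':
--             return '&#244;'
--         case 'Ocirc':
--             return '&#212;'
--         case 'ugrave':
--             return '&#249;'
--         case 'Ugrave':
--             return '&#217;'
--         case 'ucirc':
--             return '&#251;'
--         case 'Ucirc':
--             return '&#219;'
--         case _:
--             return None
--
--
-- def _replace_html_to_iso(strvalue):
--     out = []
--     i = 0
--     n = len(strvalue)
--     while i < n:
--         c = strvalue[i]
--         if c == '&':
--             j = strvalue.find(';', i + 1, i + 8)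
--             if j != -1:
--                 rep = _resolve(strvalue[i + 1:j])
--                 if rep is not None:
--                     out.append(rep)
--                     i = j + 1
--                     continue
--         out.append(c)
--         i += 1
--     return ''.join(out)
-- ===== Notes on version B (the rewrite author's own statement) =====
-- stated objective: alternative
-- what changed: Replaces A's 31 sequential whole-string str.replace passes by a single left-to-right scan that, at each '&', locates the closing ';' within the maximal entity width and resolves the entity NAME between '&' and ';' through a match-based resolver function (A's '&#160;'->'&nbsp;'->'&#32;' chain folded into the resolver), instead of any table of full-entity replacement passes.
import Mathlib
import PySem

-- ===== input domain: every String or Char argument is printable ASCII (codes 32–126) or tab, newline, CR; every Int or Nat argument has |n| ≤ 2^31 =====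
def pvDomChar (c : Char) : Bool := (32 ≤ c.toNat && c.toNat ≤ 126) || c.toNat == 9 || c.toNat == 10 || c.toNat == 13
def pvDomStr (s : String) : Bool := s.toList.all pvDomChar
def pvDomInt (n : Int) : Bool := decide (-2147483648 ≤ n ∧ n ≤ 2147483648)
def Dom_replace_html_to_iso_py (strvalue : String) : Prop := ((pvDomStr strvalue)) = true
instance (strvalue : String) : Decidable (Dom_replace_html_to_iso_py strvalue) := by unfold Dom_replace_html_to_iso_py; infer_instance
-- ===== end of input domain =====

-- B replaces A's 31 sequential whole-string replace passes by one left-to-right scan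
-- resolving the entity name between '&' and ';' with a match-based resolver
-- (objective: alternative single-pass algorithm).

set_option maxHeartbeats 2000000

-- ===== PORT A =====
def htmlToIsoA : List (String × String) :=
  [("&#8211;", "-"), ("&#8217;", "'"), ("&euro;", "&#128;"), ("&ldquo;", "&#147;"),
   ("&rdquo;", "&#148;"), ("&nbsp;", "&#32;"), ("&hellip;", "&#133;"), ("&Hellip;", "&#133;"),
   ("&agrave;", "&#224;"), ("&Agrave;", "&#192;"), ("&acirc;", "&#226;"), ("&Acirc;", "&#194;"),
   ("&ccedil;", "&#231;"), ("&Ccedil;", "&#199;"), ("&egrave;", "&#232;"), ("&Egrave;", "&#200;"),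
   ("&eacute;", "&#233;"), ("&Eacute;", "&#201;"), ("&ecirc;", "&#234;"), ("&Ecirc;", "&#202;"),
   ("&icirc;", "&#238;"), ("&Icirc;", "&#206;"), ("&iuml;", "&#239;"), ("&Iuml;", "&#207;"),
   ("&ocirc;", "&#244;"), ("&Ocirc;", "&#212;"), ("&ugrave;", "&#249;"), ("&Ugrave;", "&#217;"),
   ("&ucirc;", "&#251;"), ("&Ucirc;", "&#219;")]

def replace_html_to_iso_py (strvalue : String) : String :=
  htmlToIsoA.foldl (fun s kv => PySem.Str.replace s kv.1 kv.2)
    (PySem.Str.replace strvalue "&#160;" "&nbsp;")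

-- ===== PORT B =====
-- resolver for the entity NAME (the characters strictly between '&' and ';')
def resolveEnt : List Char → Option (List Char)
  | ['#', '1', '6', '0'] => some "&#32;".toList
  | ['n', 'b', 's', 'p'] => some "&#32;".toList
  | ['#', '8', '2', '1', '1'] => some "-".toList
  | ['#', '8', '2', '1', '7'] => some "'".toList
  | ['e', 'u', 'r', 'o'] => some "&#128;".toList
  | ['l', 'd', 'q', 'u', 'o'] => some "&#147;".toList
  | ['r', 'd', 'q', 'u', 'o'] => some "&#148;".toList
  | ['h', 'e', 'l', 'l', 'i', 'p'] => some "&#133;".toList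
  | ['H', 'e', 'l', 'l', 'i', 'p'] => some "&#133;".toList
  | ['a', 'g', 'r', 'a', 'v', 'e'] => some "&#224;".toList
  | ['A', 'g', 'r', 'a', 'v', 'e'] => some "&#192;".toList
  | ['a', 'c', 'i', 'r', 'c'] => some "&#226;".toList
  | ['A', 'c', 'i', 'r', 'c'] => some "&#194;".toList
  | ['c', 'c', 'e', 'd', 'i', 'l'] => some "&#231;".toList
  | ['C', 'c', 'e', 'd', 'i', 'l'] => some "&#199;".toList
  | ['e', 'g', 'r', 'a', 'v', 'e'] => some "&#232;".toList
  | ['E', 'g', 'r', 'a', 'v', 'e'] => some "&#200;".toList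
  | ['e', 'a', 'c', 'u', 't', 'e'] => some "&#233;".toList
  | ['E', 'a', 'c', 'u', 't', 'e'] => some "&#201;".toList
  | ['e', 'c', 'i', 'r', 'c'] => some "&#234;".toList
  | ['E', 'c', 'i', 'r', 'c'] => some "&#202;".toList
  | ['i', 'c', 'i', 'r', 'c'] => some "&#238;".toList
  | ['I', 'c', 'i', 'r', 'c'] => some "&#206;".toList
  | ['i', 'u', 'm', 'l'] => some "&#239;".toList
  | ['I', 'u', 'm', 'l'] => some "&#207;".toList
  | ['o', 'c', 'i', 'r', 'c'] => some "&#244;".toList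
  | ['O', 'c', 'i', 'r', 'c'] => some "&#212;".toList
  | ['u', 'g', 'r', 'a', 'v', 'e'] => some "&#249;".toList
  | ['U', 'g', 'r', 'a', 'v', 'e'] => some "&#217;".toList
  | ['u', 'c', 'i', 'r', 'c'] => some "&#251;".toList
  | ['U', 'c', 'i', 'r', 'c'] => some "&#219;".toList
  | _ => none

-- one pass: at '&', find the ';' within the maximal entity width (find(';', i+1, i+8)),
-- resolve the name between them, emit the replacement or the single char
def scanH2I : List Char → List Char
  | [] => []
  | c :: t =>
    if c = '&' then
      let j := PySem.Chars.find (t.take 7) [';']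
      if j = -1 then c :: scanH2I t
      else
        match resolveEnt (t.take j.toNat) with
        | some v => v ++ scanH2I (t.drop (j.toNat + 1))
        | none => c :: scanH2I t
    else c :: scanH2I t
termination_by s => s.length
decreasing_by
  all_goals simp [List.length_drop]

def replace_html_to_iso_py_alt (strvalue : String) : String :=
  String.ofList (scanH2I strvalue.toList)

-- ===== PRECONDITION & SPEC =====
def Spec_replace_html_to_iso_py (strvalue : String) (out : String) : Prop := out = replace_html_to_iso_py_alt strvalue
instance (strvalue : String) (out : String) : Decidable (Spec_replace_html_to_iso_py strvalue out) := by unfold Spec_replace_html_to_iso_py; infer_instance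

-- ===== CLAIM (what is proved, stated in full; the proofs are below) =====
def Claim_equal_replace_html_to_iso_py : Prop := ∀ (strvalue : String), Dom_replace_html_to_iso_py strvalue → Spec_replace_html_to_iso_py strvalue (replace_html_to_iso_py strvalue)

-- ===== LEMMAS AND PROOFS =====

-- proof-side table: the full '&name;' keys with their replacements, in one list
def h2iTable : List (List Char × List Char) :=
  (("&#160;", "&#32;") :: htmlToIsoA).map fun kv => (kv.1.toList, kv.2.toList)

-- one str.replace pass, written as the structural recursion it performs
def rep1 (old new : List Char) : List Char → List Char
  | [] => []
  | c :: t =>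
    if old.isPrefixOf (c :: t)
    then new ++ rep1 old new (t.drop (old.length - 1))
    else c :: rep1 old new t
termination_by s => s.length
decreasing_by
  all_goals simp [List.length_drop]

theorem go_eq_rep1 (old new : List Char) (hold : old ≠ []) :
    ∀ (fuel : Nat) (l acc : List Char), l.length ≤ fuel →
      PySem.Chars.replace.go old new fuel l acc = acc.reverse ++ rep1 old new l := by
  intro fuel
  induction fuel with
  | zero =>
    intro l acc hl
    have : l = [] := List.eq_nil_of_length_eq_zero (by omega)
    subst this
    rw [PySem.Chars.replace.go.eq_def]
    simp [rep1]
  | succ n ih =>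
    intro l acc hl
    cases l with
    | nil =>
      rw [PySem.Chars.replace.go.eq_def]
      simp [rep1]
    | cons c t =>
      rw [PySem.Chars.replace.go.eq_def]
      by_cases hp : old.isPrefixOf (c :: t)
      · simp only [hp, if_true]
        obtain ⟨m, hm⟩ : ∃ m, old.length = m + 1 := by
          cases old with
          | nil => exact absurd rfl hold
          | cons a b => exact ⟨b.length, rfl⟩
        rw [ih _ _ (by simp at hl ⊢; omega)]
        rw [rep1]
        simp only [hp, if_true]
        rw [hm, List.drop_succ_cons]
        simp
      · simp only [hp]
        rw [ih t (c :: acc) (by simp at hl ⊢; omega)]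
        rw [rep1]
        simp [hp]

theorem replace_eq_rep1 (old new s : List Char) (hold : old ≠ []) :
    PySem.Chars.replace s old new = rep1 old new s := by
  unfold PySem.Chars.replace
  rw [if_neg (by simpa using hold)]
  simpa using go_eq_rep1 old new hold s.length s [] le_rfl

theorem rep1_nil (old new : List Char) : rep1 old new [] = [] := by simp [rep1]

theorem rep1_cons_neg {old : List Char} (new : List Char) {c : Char} {t : List Char}
    (h : ¬ old <+: c :: t) : rep1 old new (c :: t) = c :: rep1 old new t := by
  rw [rep1]
  simp [List.isPrefixOf_iff_prefix, h]

theorem rep1_append_match (old new t : List Char) (hold : old ≠ []) :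
    rep1 old new (old ++ t) = new ++ rep1 old new t := by
  cases old with
  | nil => exact absurd rfl hold
  | cons a b =>
    simp only [List.cons_append]
    rw [rep1]
    rw [if_pos (by rw [List.isPrefixOf_iff_prefix]; exact ⟨t, by simp⟩)]
    simp

-- "k never matches starting inside x, whatever follows x"
def NoHit (k x : List Char) : Prop := ∀ j < x.length, ∀ w : List Char, ¬ k <+: (x.drop j ++ w)

-- cmpat k u: k could still be a prefix of u ++ (something)
def cmpat : List Char → List Char → Bool
  | [], _ => true
  | _ :: _, [] => true
  | a :: k', b :: x' => a == b && cmpat k' x'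

def noHitB (k : List Char) : List Char → Bool
  | [] => true
  | b :: x' => !cmpat k (b :: x') && noHitB k x'

theorem not_prefix_of_cmpat_false : ∀ (k u : List Char), cmpat k u = false →
    ∀ w, ¬ k <+: u ++ w := by
  intro k
  induction k with
  | nil => intro u h; simp [cmpat] at h
  | cons a k' ihk =>
    intro u h w hpre
    cases u with
    | nil => simp [cmpat] at h
    | cons b u' =>
      obtain ⟨h1, h2⟩ := List.cons_prefix_cons.mp hpre
      rw [cmpat] at h
      rcases Bool.and_eq_false_iff.mp h with h' | h'
      · rw [h1] at h'; simp at h'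
      · exact ihk u' h' w h2

theorem noHit_of_noHitB {k x : List Char} (h : noHitB k x = true) : NoHit k x := by
  induction x with
  | nil => intro j hj; simp at hj
  | cons b x' ih =>
    rw [noHitB, Bool.and_eq_true] at h
    intro j hj w
    cases j with
    | zero =>
      simpa using not_prefix_of_cmpat_false k (b :: x') (by simpa using h.1) w
    | succ j' =>
      exact ih h.2 j' (by simp at hj; omega) w

theorem rep1_append_noHit (old new x : List Char) (h : NoHit old x) :
    ∀ w, rep1 old new (x ++ w) = x ++ rep1 old new w := by
  induction x with
  | nil => intro w; simp
  | cons c xs ih =>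
    intro w
    have h0 : ¬ old <+: c :: (xs ++ w) := by
      have := h 0 (by simp) w
      simpa using this
    rw [List.cons_append, rep1_cons_neg new h0]
    rw [ih (fun j hj w' => h (j+1) (by simp; omega) w')]
    simp

def applyTable (tb : List (List Char × List Char)) (s : List Char) : List Char :=
  tb.foldl (fun acc kv => rep1 kv.1 kv.2 acc) s

theorem applyTable_nil (tb : List (List Char × List Char)) : applyTable tb [] = [] := by
  induction tb with
  | nil => rfl
  | cons kv rest ih =>
    unfold applyTable
    rw [List.foldl_cons, rep1_nil]
    exact ih

theorem applyTable_append (tb : List (List Char × List Char)) (x : List Char)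
    (h : ∀ kv ∈ tb, NoHit kv.1 x) :
    ∀ w, applyTable tb (x ++ w) = x ++ applyTable tb w := by
  induction tb with
  | nil => intro w; rfl
  | cons kv rest ih =>
    intro w
    unfold applyTable
    rw [List.foldl_cons, rep1_append_noHit kv.1 kv.2 x (h kv (by simp))]
    exact ih (fun kv' h' => h kv' (by simp [h'])) (rep1 kv.1 kv.2 w)

-- characters that may occur after the leading '&' of an entity key
def plainB (c : Char) : Bool := !(c = '&' || c = '-' || c = '\'')

theorem prefix_rep1_lift (old : List Char) (n0 : Char) (ntl : List Char)
    (hn0 : plainB n0 = false) :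
    ∀ (t w : List Char), w.all plainB = true → w <+: rep1 old (n0 :: ntl) t → w <+: t := by
  intro t
  induction t with
  | nil =>
    intro w hw hpre
    rw [rep1] at hpre
    simpa using hpre
  | cons c t' iht =>
    intro w hw hpre
    rw [rep1] at hpre
    by_cases hp : old.isPrefixOf (c :: t')
    · rw [if_pos hp] at hpre
      cases w with
      | nil => exact List.nil_prefix
      | cons w0 w' =>
        have hw00 : w0 = n0 := (List.cons_prefix_cons.mp hpre).1
        have hw0 : plainB w0 = true := List.all_eq_true.mp hw w0 (by simp)
        rw [hw00] at hw0
        rw [hw0] at hn0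
        exact absurd hn0 (by simp)
    · rw [if_neg hp] at hpre
      cases w with
      | nil => exact List.nil_prefix
      | cons w0 w' =>
        obtain ⟨h1, h2⟩ := List.cons_prefix_cons.mp hpre
        subst h1
        have : w' <+: t' := iht w' (by simp at hw ⊢; exact hw.2) h2
        exact List.cons_prefix_cons.mpr ⟨rfl, this⟩

def goodPair (kv : List Char × List Char) : Prop :=
  (∃ tl, kv.1 = '&' :: tl ∧ tl.all plainB = true) ∧
  (∃ n0 ntl, kv.2 = n0 :: ntl ∧ plainB n0 = false)

def goodPairB (kv : List Char × List Char) : Bool :=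
  match kv.1, kv.2 with
  | '&' :: tl, n0 :: _ => tl.all plainB && !(plainB n0)
  | _, _ => false

theorem goodPair_of_goodPairB {kv : List Char × List Char} (h : goodPairB kv = true) :
    goodPair kv := by
  unfold goodPairB at h
  split at h
  · rename_i s1 s2 tl n0 rest heq1 heq2
    rw [Bool.and_eq_true] at h
    exact ⟨⟨tl, heq1, h.1⟩, ⟨n0, rest, heq2, by simpa using h.2⟩⟩
  · exact absurd h (by simp)

theorem applyTable_cons (tb : List (List Char × List Char)) (hg : ∀ kv ∈ tb, goodPair kv) :
    ∀ (c : Char) (u : List Char), (∀ kv ∈ tb, ¬ kv.1 <+: c :: u) →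
      applyTable tb (c :: u) = c :: applyTable tb u := by
  induction tb with
  | nil => intro c u _; rfl
  | cons kv rest ih =>
    intro c u hnp
    unfold applyTable
    rw [List.foldl_cons, rep1_cons_neg kv.2 (hnp kv (by simp))]
    refine ih (fun kv' h' => hg kv' (by simp [h'])) c (rep1 kv.1 kv.2 u) ?_
    intro kv' h' hpre
    obtain ⟨⟨tl, htl, hplain⟩, _⟩ := hg kv' (by simp [h'])
    obtain ⟨n0, ntl, hv, hn0⟩ := (hg kv (by simp)).2
    rw [htl] at hpre
    obtain ⟨hc, htlpre⟩ := List.cons_prefix_cons.mp hpre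
    have : tl <+: u := by
      rw [hv] at htlpre
      exact prefix_rep1_lift kv.1 n0 ntl hn0 u tl hplain htlpre
    exact hnp kv' (by simp [h']) (by rw [htl, ← hc]; exact List.cons_prefix_cons.mpr ⟨rfl, this⟩)

-- the shared tail of both tables, and A's chain (with '&#160;'→'&nbsp;' first)
def table30L : List (List Char × List Char) := htmlToIsoA.map fun kv => (kv.1.toList, kv.2.toList)

def chainA : List (List Char × List Char) := ("&#160;".toList, "&nbsp;".toList) :: table30L

def pre5L : List (List Char × List Char) := table30L.take 5
def post24L : List (List Char × List Char) := table30L.drop 6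

theorem h2i_split : h2iTable = ("&#160;".toList, "&#32;".toList) :: table30L := by decide

theorem t30_split : table30L = pre5L ++ (("&nbsp;".toList, "&#32;".toList) :: post24L) := by decide

theorem applyTable_split (l1 l2 : List (List Char × List Char)) (s : List Char) :
    applyTable (l1 ++ l2) s = applyTable l2 (applyTable l1 s) := by
  unfold applyTable; rw [List.foldl_append]

theorem applyTable_cons_eq (kv : List Char × List Char) (tb : List (List Char × List Char))
    (s : List Char) : applyTable (kv :: tb) s = applyTable tb (rep1 kv.1 kv.2 s) := rfl

theorem chainA_def : chainA = ("&#160;".toList, "&nbsp;".toList) :: table30L := rfl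

theorem portA_eq (s : String) :
    replace_html_to_iso_py s = String.ofList (applyTable chainA s.toList) := by
  have key : ∀ (l : List (String × String)) (a : String), (∀ kv ∈ l, kv.1.toList ≠ []) →
      l.foldl (fun s kv => PySem.Str.replace s kv.1 kv.2) a =
      String.ofList (applyTable (l.map fun kv => (kv.1.toList, kv.2.toList)) a.toList) := by
    intro l
    induction l with
    | nil => intro a _; simp [applyTable, String.ofList_toList]
    | cons kv rest ih =>
      intro a hne
      rw [List.foldl_cons, List.map_cons, applyTable_cons_eq]
      have h1 : (PySem.Str.replace a kv.1 kv.2).toList = rep1 kv.1.toList kv.2.toList a.toList := by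
        show (String.ofList (PySem.Chars.replace a.toList kv.1.toList kv.2.toList)).toList = _
        rw [String.toList_ofList, replace_eq_rep1 _ _ _ (hne kv (by simp))]
      rw [ih _ (fun kv' h' => hne kv' (by simp [h'])), h1]
  have h0 : (PySem.Str.replace s "&#160;" "&nbsp;").toList =
      rep1 "&#160;".toList "&nbsp;".toList s.toList := by
    show (String.ofList (PySem.Chars.replace s.toList "&#160;".toList "&nbsp;".toList)).toList = _
    rw [String.toList_ofList, replace_eq_rep1 _ _ _ (by decide)]
  unfold replace_html_to_iso_py
  rw [key htmlToIsoA _ (by decide), h0]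
  rw [chainA_def, applyTable_cons_eq]
  dsimp only [table30L]

-- the resolver hits exactly the '&name;' keys of the table
theorem resolve_mem : ∀ (u v : List Char), resolveEnt u = some v →
    ('&' :: (u ++ [';']), v) ∈ h2iTable := by
  intro u v h
  unfold resolveEnt at h
  split at h <;>
    first
      | (injection h with hv; subst hv; decide)
      | exact absurd h (by simp)

theorem resolveKeys :
    (h2iTable.all fun kv => resolveEnt kv.1.tail.dropLast == some kv.2) = true := by decide

theorem singleton_prefix_iff (c : Char) (u : List Char) : [c] <+: u ↔ u[0]? = some c := by
  cases u with
  | nil => simp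
  | cons a t =>
    constructor
    · intro h; obtain ⟨hc, _⟩ := List.cons_prefix_cons.mp h; simp [← hc]
    · intro h; simp at h; exact List.cons_prefix_cons.mpr ⟨h.symm, List.nil_prefix⟩

theorem findSemi (mid q : List Char) (hmid : ';' ∉ mid) :
    PySem.Chars.find (mid ++ ';' :: q) [';'] = (mid.length : Int) := by
  have hinf : [';'] <:+: mid ++ ';' :: q := ⟨mid, q, by simp⟩
  have hnn : 0 ≤ PySem.Chars.find (mid ++ ';' :: q) [';'] :=
    (PySem.Chars.find_nonneg_iff _ _).mpr hinf
  obtain ⟨h1, h2⟩ := PySem.Chars.find_spec hnn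
  set F := PySem.Chars.find (mid ++ ';' :: q) [';'] with hF
  have hFn : F = (F.toNat : Int) := by omega
  rw [hFn]
  congr 1
  by_contra hne
  rcases Nat.lt_or_ge F.toNat mid.length with hlt | hge
  · rw [singleton_prefix_iff] at h1
    rw [List.getElem?_drop, List.getElem?_append_left (by omega)] at h1
    exact hmid (List.mem_iff_getElem?.mpr ⟨F.toNat + 0, h1⟩)
  · have hgt : mid.length < F.toNat := by omega
    apply h2 mid.length hgt
    rw [singleton_prefix_iff, List.getElem?_drop, List.getElem?_append_right (by omega)]
    simp

theorem scan_nomatch (c : Char) (t : List Char)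
    (h : ∀ kv ∈ h2iTable, ¬ kv.1 <+: c :: t) :
    scanH2I (c :: t) = c :: scanH2I t := by
  rw [scanH2I]
  by_cases hc : c = '&'
  · rw [if_pos hc]
    set j := PySem.Chars.find (t.take 7) [';'] with hj
    by_cases hj1 : j = -1
    · rw [if_pos hj1]
    · rw [if_neg hj1]
      cases hres : resolveEnt (t.take j.toNat) with
      | none => rfl
      | some v =>
        exfalso
        have hnn : 0 ≤ j := by
          have := PySem.Chars.neg_one_le_find (t.take 7) [';']
          rw [← hj] at this
          omega
        obtain ⟨h1, _⟩ := PySem.Chars.find_spec (by rw [← hj]; exact hnn)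
        rw [← hj] at h1
        rw [singleton_prefix_iff, List.getElem?_drop, Nat.add_zero] at h1
        have hsemi : t[j.toNat]? = some ';' := by
          rw [List.getElem?_take] at h1
          split at h1
          · exact h1
          · exact absurd h1 (by simp)
        have hjlt : j.toNat < t.length := (List.getElem?_eq_some_iff.mp hsemi).1
        have hdec : t = t.take j.toNat ++ ';' :: t.drop (j.toNat + 1) := by
          conv_lhs => rw [← List.take_append_drop j.toNat t]
          congr 1
          rw [List.drop_eq_getElem_cons hjlt]
          congr 1
          have := (List.getElem?_eq_some_iff.mp hsemi).2
          exact this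
        apply h _ (resolve_mem _ _ hres)
        refine List.cons_prefix_cons.mpr ⟨hc.symm, ?_⟩
        conv_rhs => rw [hdec]
        exact ⟨t.drop (j.toNat + 1), by simp⟩
  · rw [if_neg hc]

-- key shape: k = '&' :: mid ++ [';'] with ';' ∉ mid and mid.length ≤ 6
def keyShapeB (k : List Char) : Bool :=
  (k.head? == some '&') && (k.getLast? == some ';') && decide (2 ≤ k.length)
    && !(k.tail.dropLast.contains ';') && decide (k.length ≤ 8)

theorem keyShape_decompose {k : List Char} (h : keyShapeB k = true) :
    ∃ mid, k = '&' :: (mid ++ [';']) ∧ ';' ∉ mid ∧ mid.length ≤ 6 := by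
  unfold keyShapeB at h
  simp only [Bool.and_eq_true] at h
  obtain ⟨⟨⟨⟨h1, h2⟩, h3⟩, h4⟩, h5⟩ := h
  have h3' := of_decide_eq_true h3
  have h5' := of_decide_eq_true h5
  cases k with
  | nil => simp at h3'
  | cons c t =>
    have hc : c = '&' := by simpa using h1
    have ht : t ≠ [] := by
      intro he; rw [he] at h3'; simp at h3'
    refine ⟨t.dropLast, ?_, ?_, ?_⟩
    · rw [hc]
      congr 1
      have hgl : t.getLast ht = ';' := by
        have h2' : (c :: t).getLast? = some ';' := by simpa using h2
        rw [List.getLast?_eq_some_getLast (List.cons_ne_nil c t)] at h2'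
        have h2'' := Option.some.inj h2'
        rw [List.getLast_cons ht] at h2''
        exact h2''
      conv_lhs => rw [← List.dropLast_append_getLast ht]
      rw [hgl]
    · intro hmem
      rw [List.tail_cons] at h4
      simp only [Bool.not_eq_true'] at h4
      rw [List.contains_eq_any_beq] at h4
      have hany : (t.dropLast.any fun x => ';' == x) = true :=
        List.any_eq_true.mpr ⟨';', hmem, by simp⟩
      rw [h4] at hany
      simp at hany
    · have h7 : t.length ≤ 7 := by simp at h5'; omega
      have hld : t.dropLast.length = t.length - 1 := List.length_dropLast
      omega

theorem keysShape : h2iTable.all (fun kv => keyShapeB kv.1) = true := by decide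

theorem keysNodup : (h2iTable.map Prod.fst).Nodup := by decide

theorem scan_match {kv : List Char × List Char} (hm : kv ∈ h2iTable)
    {s : List Char} (hp : kv.1 <+: s) :
    scanH2I s = kv.2 ++ scanH2I (s.drop kv.1.length) := by
  obtain ⟨mid, hk, hsem, hlen⟩ := keyShape_decompose (List.all_eq_true.mp keysShape kv hm)
  obtain ⟨r, hr⟩ := hp
  have hklen : kv.1.length = mid.length + 2 := by rw [hk]; simp
  have hs : s = '&' :: (mid ++ ';' :: r) := by rw [← hr, hk]; simp
  subst hs
  have htake7 : (mid ++ ';' :: r).take 7 = mid ++ ';' :: (r.take (6 - mid.length)) := by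
    rw [List.take_append]
    rw [List.take_of_length_le (by omega)]
    congr 1
    have h7 : 7 - mid.length = (6 - mid.length) + 1 := by omega
    rw [h7, List.take_succ_cons]
  have hfind : PySem.Chars.find ((mid ++ ';' :: r).take 7) [';'] = (mid.length : Int) := by
    rw [htake7, findSemi _ _ hsem]
  have htake : (mid ++ ';' :: r).take mid.length = mid := by
    rw [List.take_append]
    simp
  have hdrop1 : (mid ++ ';' :: r).drop (mid.length + 1) = r := by
    rw [List.drop_append]
    simp
  have hdrop2 : ('&' :: (mid ++ ';' :: r)).drop kv.1.length = r := by
    rw [hklen, List.drop_succ_cons]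
    exact hdrop1
  have hres : resolveEnt mid = some kv.2 := by
    have := List.all_eq_true.mp resolveKeys kv hm
    have hmid : kv.1.tail.dropLast = mid := by
      rw [hk, List.tail_cons, List.dropLast_concat]
    rw [hmid] at this
    simpa using this
  rw [scanH2I, if_pos rfl]
  simp only [hfind]
  rw [if_neg (show ¬((mid.length : Int) = -1) by omega)]
  simp only [Int.toNat_natCast, htake, hdrop1, hres, hdrop2]

-- finite facts about the concrete tables, checked by evaluation
theorem goodChain : chainA.all goodPairB = true := by decide

theorem pairNoHitB : (h2iTable.all fun a => h2iTable.all fun b => (a.1 == b.1) || noHitB a.1 b.1) = true := by decide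

theorem valNoHitB : (h2iTable.all fun a => table30L.all fun b => noHitB a.1 b.2) = true := by decide

theorem nbspNoHitB : (pre5L.all fun a => noHitB a.1 "&nbsp;".toList) = true := by decide

theorem keysNonemptyB : (h2iTable.all fun a => !a.1.isEmpty) = true := by decide

theorem keysEq : chainA.map Prod.fst = h2iTable.map Prod.fst := by decide

theorem mem30_mem {kv : List Char × List Char} (h : kv ∈ table30L) : kv ∈ h2iTable := by
  rw [h2i_split]; exact List.mem_cons_of_mem _ h

theorem head0_mem : ("&#160;".toList, "&#32;".toList) ∈ h2iTable := by
  rw [h2i_split]; exact List.mem_cons_self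

theorem nbsp_mem30 : ("&nbsp;".toList, "&#32;".toList) ∈ table30L := by
  rw [t30_split]; exact List.mem_append_right _ List.mem_cons_self

theorem keysNonempty {kv : List Char × List Char} (h : kv ∈ h2iTable) : kv.1 ≠ [] := by
  have := List.all_eq_true.mp keysNonemptyB kv h
  simpa using this

theorem noHit_pair {a b : List Char × List Char} (ha : a ∈ h2iTable) (hb : b ∈ h2iTable)
    (hne : a.1 ≠ b.1) : NoHit a.1 b.1 := by
  have := List.all_eq_true.mp (List.all_eq_true.mp pairNoHitB a ha) b hb
  rw [Bool.or_eq_true] at this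
  rcases this with h | h
  · exact absurd (by simpa using h) hne
  · exact noHit_of_noHitB h

theorem noHit_val {a b : List Char × List Char} (ha : a ∈ h2iTable) (hb : b ∈ table30L) :
    NoHit a.1 b.2 :=
  noHit_of_noHitB (List.all_eq_true.mp (List.all_eq_true.mp valNoHitB a ha) b hb)

theorem nodup30 : (table30L.map Prod.fst).Nodup := by
  have h := keysNodup
  rw [h2i_split, List.map_cons, List.nodup_cons] at h
  exact h.2

theorem k0_not30 : "&#160;".toList ∉ table30L.map Prod.fst := by
  have h := keysNodup
  rw [h2i_split, List.map_cons, List.nodup_cons] at h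
  exact h.1

theorem main_equiv : ∀ (n : Nat) (s : List Char), s.length ≤ n →
    applyTable chainA s = scanH2I s := by
  intro n
  induction n with
  | zero =>
    intro s hs
    have : s = [] := List.eq_nil_of_length_eq_zero (by omega)
    subst this
    rw [applyTable_nil, scanH2I]
  | succ n ih =>
    intro s hs
    cases s with
    | nil => rw [applyTable_nil, scanH2I]
    | cons c t =>
      by_cases hex : ∃ kv ∈ h2iTable, kv.1 <+: c :: t
      · obtain ⟨kv, hm, hpre⟩ := hex
        obtain ⟨r, hr⟩ := hpre
        have hkne : kv.1 ≠ [] := keysNonempty hm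
        have hk1 : 1 ≤ kv.1.length := List.length_pos_iff.mpr hkne
        have hrlen : r.length ≤ n := by
          have hlen := congrArg List.length hr
          simp only [List.length_append, List.length_cons] at hlen hs ⊢
          omega
        have hscan : scanH2I (c :: t) = kv.2 ++ scanH2I r := by
          rw [← hr, scan_match hm ⟨r, rfl⟩, List.drop_left]
        rcases (by rw [h2i_split] at hm; exact List.mem_cons.mp hm :
            kv = ("&#160;".toList, "&#32;".toList) ∨ kv ∈ table30L) with hk0 | hm30
        · -- the '&#160;' entry: A routes it through '&nbsp;' and then to '&#32;'
          have e2 : ∀ u, applyTable table30L ("&nbsp;".toList ++ u)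
              = "&#32;".toList ++ applyTable table30L u := by
            intro u
            rw [t30_split, applyTable_split, applyTable_cons_eq]
            rw [applyTable_append pre5L _
              (fun a ha => noHit_of_noHitB (List.all_eq_true.mp nbspNoHitB a ha))]
            rw [rep1_append_match _ _ _ (by decide)]
            rw [applyTable_append post24L _ (fun a ha => noHit_val
              (mem30_mem (by rw [t30_split]; exact List.mem_append_right _ (List.mem_cons_of_mem _ ha)))
              nbsp_mem30)]
            conv_rhs => rw [applyTable_split, applyTable_cons_eq]
          have eL : applyTable chainA ("&#160;".toList ++ r)
              = "&#32;".toList ++ applyTable chainA r := by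
            rw [chainA_def, applyTable_cons_eq, applyTable_cons_eq,
              rep1_append_match _ _ _ (by decide), e2]
          rw [hscan, ← hr, hk0]
          dsimp only
          rw [eL, ih r hrlen]
        · -- a regular entry of the 30-entry table
          obtain ⟨pre, post, hsplit⟩ := List.append_of_mem hm30
          have hpre30 : ∀ a ∈ pre, a ∈ table30L := by
            intro a ha; rw [hsplit]; exact List.mem_append_left _ ha
          have hpost30 : ∀ a ∈ post, a ∈ table30L := by
            intro a ha; rw [hsplit]
            exact List.mem_append_right _ (List.mem_cons_of_mem _ ha)
          have hprene : ∀ a ∈ pre, a.1 ≠ kv.1 := by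
            intro a ha he
            have h := nodup30
            rw [hsplit, List.map_append, List.nodup_append] at h
            exact h.2.2 a.1 (List.mem_map.mpr ⟨a, ha, rfl⟩) kv.1
              (List.mem_map.mpr ⟨kv, List.mem_cons_self, rfl⟩) he
          have hne0 : "&#160;".toList ≠ kv.1 := by
            intro he
            exact k0_not30 (by rw [he]; exact List.mem_map.mpr ⟨kv, hm30, rfl⟩)
          have e2 : ∀ u, applyTable table30L (kv.1 ++ u) = kv.2 ++ applyTable table30L u := by
            intro u
            rw [hsplit, applyTable_split, applyTable_cons_eq]
            rw [applyTable_append pre _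
              (fun a ha => noHit_pair (mem30_mem (hpre30 a ha)) hm (hprene a ha))]
            rw [rep1_append_match _ _ _ hkne]
            rw [applyTable_append post _
              (fun a ha => noHit_val (mem30_mem (hpost30 a ha)) hm30)]
            conv_rhs => rw [applyTable_split, applyTable_cons_eq]
          have eL : applyTable chainA (kv.1 ++ r) = kv.2 ++ applyTable chainA r := by
            rw [chainA_def, applyTable_cons_eq, applyTable_cons_eq,
              rep1_append_noHit _ _ _ (noHit_pair head0_mem hm hne0), e2]
          rw [hscan, ← hr, eL, ih r hrlen]
      · have hex : ∀ kv ∈ h2iTable, ¬ kv.1 <+: c :: t := by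
          intro kv hkv hp
          exact hex ⟨kv, hkv, hp⟩
        have hgp : ∀ kv ∈ chainA, goodPair kv :=
          fun kv h => goodPair_of_goodPairB (List.all_eq_true.mp goodChain kv h)
        have hnp : ∀ kv ∈ chainA, ¬ kv.1 <+: c :: t := by
          intro kv h
          have hmem : kv.1 ∈ h2iTable.map Prod.fst := by
            rw [← keysEq]; exact List.mem_map.mpr ⟨kv, h, rfl⟩
          obtain ⟨kv', hm', he'⟩ := List.mem_map.mp hmem
          rw [← he']
          exact hex kv' hm'
        rw [applyTable_cons chainA hgp c t hnp, scan_nomatch c t hex,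
          ih t (by simp at hs; omega)]

-- ===== VERDICT (by name: the statement is the Claim_ definition above) =====
theorem replace_html_to_iso_py_spec : Claim_equal_replace_html_to_iso_py := by
  intro s _
  unfold Spec_replace_html_to_iso_py replace_html_to_iso_py_alt
  rw [portA_eq, main_equiv s.toList.length s.toList le_rfl]
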